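-- pv_equiv track=rewrite | github.com/frss-univesp/projeto-integrador-iii-2024 | engenharia_dados/extracao_acidentes_historico.py | gerar_links
-- ===== SOURCE A (Python) =====
-- def gerar_links(ano_inicial, mes_inicial, ano_final, mes_final):
--     links = []
--     ano = ano_inicial
--     mes = mes_inicial
--
--     while (ano < ano_final) or (ano == ano_final and mes <= mes_final):
--         mes_formatado = f"{mes:02}"
--         link = f'https://armazenamento-dadosabertos.s3.sa-east-1.amazonaws.com/PDA_2023_2025/Grupos_de_dados/Comunica%C3%A7%C3%B5es+de+Acidente+de+Trabalho+%E2%80%93+CAT/D.SDA.PDA.005.CAT.{ano}{mes_formatado}.ZIP'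
--         links.append(link)
--         mes += 1
--
--         if mes > 12:
--             mes = 1
--             ano += 1
--
--     return links
-- ===== SOURCE B (Python) =====
-- def gerar_links(ano_inicial, mes_inicial, ano_final, mes_final):
--     if (ano_inicial, mes_inicial) > (ano_final, mes_final):
--         return []
--     # clamp malformed month arguments into the calendar range 1..12
--     inicio = ano_inicial * 12 + min(max(mes_inicial, 1), 12) - 1
--     fim = ano_final * 12 + min(max(mes_final, 1), 12) - 1
--     return [
--         f'https://armazenamento-dadosabertos.s3.sa-east-1.amazonaws.com/PDA_2023_2025/Grupos_de_dados/Comunica%C3%A7%C3%B5es+de+Acidente+de+Trabalho+%E2%80%93+CAT/D.SDA.PDA.005.CAT.{i // 12}{i % 12 + 1:02}.ZIP'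
--         for i in range(inicio, fim + 1)
--     ]
-- ===== Notes on version B (the rewrite author's own statement) =====
-- stated objective: simpler
-- what changed: Replaces the stateful while-loop with an explicit month/year carry branch by an emptiness guard plus a single comprehension over absolute month indices (months clamped into 1..12), recovering year and month with // and %.
import Mathlib
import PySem

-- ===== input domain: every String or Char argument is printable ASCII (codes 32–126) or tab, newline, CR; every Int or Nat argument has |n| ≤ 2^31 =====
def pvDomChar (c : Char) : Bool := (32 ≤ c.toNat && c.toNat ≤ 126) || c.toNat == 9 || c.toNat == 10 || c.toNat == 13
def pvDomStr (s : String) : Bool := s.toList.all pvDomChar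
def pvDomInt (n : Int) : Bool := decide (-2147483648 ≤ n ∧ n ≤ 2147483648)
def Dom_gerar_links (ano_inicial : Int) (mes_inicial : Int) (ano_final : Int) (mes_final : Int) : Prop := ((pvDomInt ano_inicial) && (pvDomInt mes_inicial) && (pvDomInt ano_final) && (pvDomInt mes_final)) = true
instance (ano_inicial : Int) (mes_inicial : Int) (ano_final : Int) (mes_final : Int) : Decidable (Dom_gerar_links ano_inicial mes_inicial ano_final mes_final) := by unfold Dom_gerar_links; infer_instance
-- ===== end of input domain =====

-- B replaces A's while-loop with an explicit month carry branch by one comprehension over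
-- absolute month indices, recovering year/month with // and % (objective: simpler).

-- ===== PORT A =====
-- f"{n:02}": zero-pad to width 2 (a negative one-digit number already has width 2) — exact for all ints
def pvPad2 (n : Int) : String :=
  if 0 ≤ n ∧ n ≤ 9 then "0" ++ PySem.Int.toStr n else PySem.Int.toStr n

-- the f-string URL both Python sources build for a given (ano, mes_formatado)
def pvUrl (ano mes : Int) : String :=
  "https://armazenamento-dadosabertos.s3.sa-east-1.amazonaws.com/PDA_2023_2025/Grupos_de_dados/Comunica%C3%A7%C3%B5es+de+Acidente+de+Trabalho+%E2%80%93+CAT/D.SDA.PDA.005.CAT."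
    ++ PySem.Int.toStr ano ++ pvPad2 mes ++ ".ZIP"

-- A's while loop, state (ano, mes, links); fuel = an upper bound on the remaining
-- iterations (the loop's termination measure), only there to make the recursion structural
def gerar_links_loop (fuel : Nat) (ano_final mes_final ano mes : Int) (links : List String) : List String :=
  match fuel with
  | 0 => links
  | fuel + 1 =>
    if ano < ano_final ∨ (ano = ano_final ∧ mes ≤ mes_final) then
      if 12 < mes + 1 then gerar_links_loop fuel ano_final mes_final (ano + 1) 1 (links ++ [pvUrl ano mes])
      else gerar_links_loop fuel ano_final mes_final ano (mes + 1) (links ++ [pvUrl ano mes])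
    else links

def gerar_links (ano_inicial : Int) (mes_inicial : Int) (ano_final : Int) (mes_final : Int) : List String :=
  gerar_links_loop ((ano_final + 1 - ano_inicial).toNat * 14 + (13 - mes_inicial).toNat)
    ano_final mes_final ano_inicial mes_inicial []

-- ===== PORT B =====
def gerar_links_alt (ano_inicial : Int) (mes_inicial : Int) (ano_final : Int) (mes_final : Int) : List String :=
  -- (ano_inicial, mes_inicial) > (ano_final, mes_final): Python's lexicographic tuple order
  if ano_final < ano_inicial ∨ (ano_inicial = ano_final ∧ mes_final < mes_inicial) then []
  else
    -- months clamped into the calendar range 1..12 (min(max(m,1),12))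
    let inicio := ano_inicial * 12 + min (max mes_inicial 1) 12 - 1
    let fim := ano_final * 12 + min (max mes_final 1) 12 - 1
    (PySem.List.pyRange inicio (fim + 1) 1).map
      (fun i => pvUrl (PySem.Int.floordiv i 12) (PySem.Int.mod i 12 + 1))

-- ===== PRECONDITION & SPEC =====
-- Pre_ admits the calendar-sensible inputs (start month 1..12 and end month >= 1; A itself
-- treats an end month > 12 as December) and every input whose start exceeds its end (both
-- programs return []). It excludes only malformed month values, for which no calendar
-- behaviour is specified and the two programs make different defensible choices: A emits the
-- raw out-of-range month field (e.g. "00") before carrying, B clamps the month into 1..12.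
def Pre_gerar_links (ano_inicial : Int) (mes_inicial : Int) (ano_final : Int) (mes_final : Int) : Prop :=
  (1 ≤ mes_inicial ∧ mes_inicial ≤ 12 ∧ 1 ≤ mes_final) ∨
  (ano_final < ano_inicial ∨ (ano_inicial = ano_final ∧ mes_final < mes_inicial))
instance (ano_inicial : Int) (mes_inicial : Int) (ano_final : Int) (mes_final : Int) : Decidable (Pre_gerar_links ano_inicial mes_inicial ano_final mes_final) := by unfold Pre_gerar_links; infer_instance

def pvWitness_gerar_links : Int × Int × Int × Int := (2023, 1, 2023, 12)

def Spec_gerar_links (ano_inicial : Int) (mes_inicial : Int) (ano_final : Int) (mes_final : Int) (out : List String) : Prop := out = gerar_links_alt ano_inicial mes_inicial ano_final mes_final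
instance (ano_inicial : Int) (mes_inicial : Int) (ano_final : Int) (mes_final : Int) (out : List String) : Decidable (Spec_gerar_links ano_inicial mes_inicial ano_final mes_final out) := by unfold Spec_gerar_links; infer_instance

-- ===== CLAIM (what is proved, stated in full; the proofs are below) =====
def Claim_equal_gerar_links : Prop := ∀ (ano_inicial : Int) (mes_inicial : Int) (ano_final : Int) (mes_final : Int), Dom_gerar_links ano_inicial mes_inicial ano_final mes_final → Pre_gerar_links ano_inicial mes_inicial ano_final mes_final → Spec_gerar_links ano_inicial mes_inicial ano_final mes_final (gerar_links ano_inicial mes_inicial ano_final mes_final)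

-- ===== LEMMAS AND PROOFS =====
-- decoding the absolute month index of a valid (ano, mes)
lemma pv_decode (ano mes : Int) (h1 : 1 ≤ mes) (h2 : mes ≤ 12) :
    PySem.Int.floordiv (ano * 12 + (mes - 1)) 12 = ano ∧
      PySem.Int.mod (ano * 12 + (mes - 1)) 12 + 1 = mes := by
  have hq : PySem.Int.floordiv (ano * 12 + (mes - 1)) 12 = ano := by
    rw [PySem.Int.floordiv_eq_iff_of_pos (by omega)]
    omega
  refine ⟨hq, ?_⟩
  have := PySem.Int.floordiv_mul_add_mod (ano * 12 + (mes - 1)) 12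
  rw [hq] at this
  omega

-- a loop whose continue-condition is already false returns its accumulator unchanged
lemma pv_loop_stop (fuel : Nat) (ano_final mes_final ano mes : Int) (links : List String)
    (h : ¬(ano < ano_final ∨ (ano = ano_final ∧ mes ≤ mes_final))) :
    gerar_links_loop fuel ano_final mes_final ano mes links = links := by
  cases fuel with
  | zero => rfl
  | succ fuel => rw [gerar_links_loop, if_neg h]

-- A's loop produces exactly B's map over the remaining month indices
lemma pv_loop_eq (ano_final mes_final : Int) (hf1 : 1 ≤ mes_final) :
    ∀ (fuel : Nat) (ano mes : Int) (links : List String),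
    (ano_final + 1 - ano).toNat * 14 + (13 - mes).toNat ≤ fuel → 1 ≤ mes → mes ≤ 12 →
    gerar_links_loop fuel ano_final mes_final ano mes links =
      links ++ (PySem.List.pyRange (ano * 12 + (mes - 1)) (ano_final * 12 + min (max mes_final 1) 12 - 1 + 1) 1).map
        (fun i => pvUrl (PySem.Int.floordiv i 12) (PySem.Int.mod i 12 + 1)) := by
  intro fuel
  induction fuel with
  | zero =>
    intro ano mes links hfuel hm1 hm2
    -- zero fuel forces ano_final < ano: the loop condition is false and the range is empty
    rw [pv_loop_stop 0 ano_final mes_final ano mes links (by omega),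
      PySem.List.pyRange_one_eq_nil (by omega)]
    simp only [List.map_nil, List.append_nil]
  | succ fuel ih =>
    intro ano mes links hfuel hm1 hm2
    by_cases hcond : ano < ano_final ∨ (ano = ano_final ∧ mes ≤ mes_final)
    · rw [gerar_links_loop, if_pos hcond]
      have hstart : ano * 12 + (mes - 1) < ano_final * 12 + min (max mes_final 1) 12 - 1 + 1 := by omega
      rw [PySem.List.pyRange_one_cons hstart]
      have hd := pv_decode ano mes hm1 hm2
      by_cases hcarry : 12 < mes + 1
      · rw [if_pos hcarry, ih (ano + 1) 1 _ (by omega) (by norm_num) (by norm_num)]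
        have hidx : ano * 12 + (mes - 1) + 1 = (ano + 1) * 12 + (1 - 1) := by omega
        rw [List.map_cons, hd.1, hd.2, hidx]
        simp only [List.append_assoc, List.singleton_append]
      · rw [if_neg hcarry, ih ano (mes + 1) _ (by omega) (by omega) (by omega)]
        have hidx : ano * 12 + (mes - 1) + 1 = ano * 12 + (mes + 1 - 1) := by omega
        rw [List.map_cons, hd.1, hd.2, hidx]
        simp only [List.append_assoc, List.singleton_append]
    · rw [pv_loop_stop _ _ _ _ _ _ hcond, PySem.List.pyRange_one_eq_nil (by omega)]
      simp only [List.map_nil, List.append_nil]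

-- ===== VERDICT (by name: the statement is the Claim_ definition above) =====
theorem gerar_links_spec : Claim_equal_gerar_links := by
  intro ai mi af mf _ hpre
  unfold Spec_gerar_links gerar_links gerar_links_alt
  by_cases hg : af < ai ∨ (ai = af ∧ mf < mi)
  · rw [if_pos hg, pv_loop_stop _ _ _ _ _ _ (by omega)]
  · rw [if_neg hg]
    rcases hpre with ⟨h1, h2, h3⟩ | hstop
    · have := pv_loop_eq af mf h3 ((af + 1 - ai).toNat * 14 + (13 - mi).toNat) ai mi []
        (le_refl _) h1 h2
      simpa [show ai * 12 + min (max mi 1) 12 - 1 = ai * 12 + (mi - 1) by omega] using this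
    · exact absurd hstop hg
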